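-- pv_equiv track=rewrite | github.com/ionutms/KiCAD_Symbols_Generator | scripts/diodes/footprint_diode_generator.py | generate_pin_numbers
-- ===== SOURCE A (Python) =====
-- def generate_pin_numbers(start: int, end: int) -> list[int]:
--     """Generate a list of pin numbers in a zig-zag pattern.
--
--     Args:
--         start: Starting pin number
--         end: Ending pin number
--
--     Returns:
--         List of pin numbers in a zig-zag pattern
--
--     """
--     original_list = list(range(start, end + 1))
--     result = []
--
--     while original_list:
--         result.append(original_list.pop(0))
--         if original_list:
--             result.append(original_list.pop(-1))
--
--     return result
-- ===== SOURCE B (Python) =====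
-- def generate_pin_numbers(start: int, end: int) -> list[int]:
--     """Zig-zag pin ordering via a two-pointer sweep (no range list, no pop(0) shifting)."""
--     result = []
--     lo, hi = start, end
--     while lo <= hi:
--         result.append(lo)
--         if lo < hi:
--             result.append(hi)
--         lo += 1
--         hi -= 1
--     return result
-- ===== Notes on version B (the rewrite author's own statement) =====
-- stated objective: faster
-- what changed: Replaces the loop that pops from the front of a materialized range (each pop(0) shifts the whole list) with a two-pointer sweep over the interval endpoints; intended as faster (a timing run measured B 30.7x at n=262144 with A timing out on some runs, reported as unconfirmed).
import Mathlib
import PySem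

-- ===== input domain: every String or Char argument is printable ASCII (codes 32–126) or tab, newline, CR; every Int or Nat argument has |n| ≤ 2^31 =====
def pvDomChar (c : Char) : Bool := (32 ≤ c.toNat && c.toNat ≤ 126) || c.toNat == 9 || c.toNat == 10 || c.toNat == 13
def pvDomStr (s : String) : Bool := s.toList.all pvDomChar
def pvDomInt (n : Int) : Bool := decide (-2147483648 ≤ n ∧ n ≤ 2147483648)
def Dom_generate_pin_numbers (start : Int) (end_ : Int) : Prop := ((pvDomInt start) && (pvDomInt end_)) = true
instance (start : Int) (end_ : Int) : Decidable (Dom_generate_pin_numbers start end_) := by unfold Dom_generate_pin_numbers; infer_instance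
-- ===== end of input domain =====

-- B replaces A's pop-from-front loop over a materialized range with a two-pointer
-- sweep over the interval endpoints (intended as faster; timing run measured B ~30x at the largest size, reported unconfirmed); return values proved equal.


-- ===== PORT A =====
-- A's while loop: pop(0) from the front, then (if nonempty) pop(-1) from the back.
def pvZigA : List Int → List Int
  | [] => []
  | [x] => [x]
  | x :: y :: ys => x :: (y :: ys).getLast (by simp) :: pvZigA (y :: ys).dropLast
  termination_by l => l.length
  decreasing_by simp [List.length_dropLast]

def generate_pin_numbers (start : Int) (end_ : Int) : List Int :=
  pvZigA (PySem.List.pyRange start (end_ + 1) 1)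

-- ===== PORT B =====
-- B's while loop: two pointers lo/hi, append lo, then hi if lo < hi, move both inward.
def pvZigB (lo hi : Int) : List Int :=
  if h : lo ≤ hi then
    if lo < hi then lo :: hi :: pvZigB (lo + 1) (hi - 1) else [lo]
  else []
  termination_by (hi + 1 - lo).toNat
  decreasing_by omega

def generate_pin_numbers_alt (start : Int) (end_ : Int) : List Int :=
  pvZigB start end_

-- ===== PRECONDITION & SPEC =====
def Spec_generate_pin_numbers (start : Int) (end_ : Int) (out : List Int) : Prop := out = generate_pin_numbers_alt start end_
instance (start : Int) (end_ : Int) (out : List Int) : Decidable (Spec_generate_pin_numbers start end_ out) := by unfold Spec_generate_pin_numbers; infer_instance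

-- ===== CLAIM (what is proved, stated in full; the proofs are below) =====
def Claim_equal_generate_pin_numbers : Prop := ∀ (start : Int) (end_ : Int), Dom_generate_pin_numbers start end_ → Spec_generate_pin_numbers start end_ (generate_pin_numbers start end_)

-- ===== LEMMAS AND PROOFS =====

theorem pvZig_eq : ∀ (n : Nat) (lo hi : Int), (hi + 1 - lo).toNat = n →
    pvZigA (PySem.List.pyRange lo (hi + 1) 1) = pvZigB lo hi := by
  intro n
  induction n using Nat.strong_induction_on with
  | _ n ih =>
    intro lo hi hn
    by_cases hle : lo ≤ hi
    · by_cases hlt : lo < hi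
      · -- at least two elements: range = lo :: (middle ++ [hi])
        have h1 : PySem.List.pyRange lo (hi + 1) 1
            = lo :: PySem.List.pyRange (lo + 1) (hi + 1) 1 :=
          PySem.List.pyRange_one_cons (by omega)
        have h2 : PySem.List.pyRange (lo + 1) (hi + 1) 1
            = PySem.List.pyRange (lo + 1) hi 1 ++ [hi] :=
          PySem.List.pyRange_one_succ_right (by omega)
        have hne : PySem.List.pyRange (lo + 1) (hi + 1) 1 ≠ [] := by
          rw [h2]; simp
        rw [h1]
        rcases hmid : PySem.List.pyRange (lo + 1) (hi + 1) 1 with _ | ⟨y, ys⟩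
        · exact absurd hmid hne
        · have hg : (y :: ys).getLast (by simp) = hi := by
            have h3 : (y :: ys).getLast? = some hi := by rw [← hmid, h2]; simp
            rw [List.getLast?_eq_some_getLast (by simp)] at h3
            exact Option.some.inj h3
          have hd : (y :: ys).dropLast = PySem.List.pyRange (lo + 1) hi 1 := by
            rw [← hmid, h2]; simp
          rw [pvZigA, hg, hd]
          have hrec : PySem.List.pyRange (lo + 1) hi 1
              = PySem.List.pyRange (lo + 1) ((hi - 1) + 1) 1 := by norm_num
          rw [hrec, ih ((hi - 1) + 1 - (lo + 1)).toNat (by omega) (lo + 1) (hi - 1) rfl]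
          conv_rhs => rw [pvZigB]
          simp [hle, hlt]
      · -- exactly one element
        have heq : lo = hi := by omega
        subst heq
        rw [PySem.List.pyRange_one_singleton]
        rw [pvZigB]
        simp [pvZigA]
    · -- empty
      rw [PySem.List.pyRange_one_eq_nil (by omega)]
      rw [pvZigB]
      simp [pvZigA, hle]

-- ===== VERDICT (by name: the statement is the Claim_ definition above) =====
theorem generate_pin_numbers_spec : Claim_equal_generate_pin_numbers := by
  intro start end_ _
  unfold Spec_generate_pin_numbers generate_pin_numbers generate_pin_numbers_alt
  exact pvZig_eq _ start end_ rfl
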